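-- pv_equiv track=rewrite | github.com/pozorvlak/cassidoo | 2021/2021-02-15_make_sentence/make_sentence.py | oracle_generator
-- ===== SOURCE A (Python) =====
-- def oracle_generator(s, words):
--     if s == "":
--         yield []
--         return
--     for word in words:
--         if s.startswith(word):
--             for suffix in oracle_generator(s[len(word):], words):
--                 yield [word] + suffix
--     return
-- ===== SOURCE B (Python) =====
-- def oracle_generator(s, words):
--     # Bottom-up DP over suffixes: sols[i] = all segmentations of s[i:],
--     # computed once for each i instead of re-exploring each suffix recursively.
--     n = len(s)
--     sols = {n: [[]]}
--     for i in range(n - 1, -1, -1):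
--         sols[i] = [[w] + rest
--                    for w in words
--                    if s.startswith(w, i)
--                    for rest in sols[i + len(w)]]
--     yield from sols[0]
-- ===== Notes on version B (the rewrite author's own statement) =====
-- stated objective: alternative
-- what changed: Replaces A's naive top-down recursive generator with a bottom-up dynamic program that builds the segmentation list of every suffix exactly once.
import Mathlib
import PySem

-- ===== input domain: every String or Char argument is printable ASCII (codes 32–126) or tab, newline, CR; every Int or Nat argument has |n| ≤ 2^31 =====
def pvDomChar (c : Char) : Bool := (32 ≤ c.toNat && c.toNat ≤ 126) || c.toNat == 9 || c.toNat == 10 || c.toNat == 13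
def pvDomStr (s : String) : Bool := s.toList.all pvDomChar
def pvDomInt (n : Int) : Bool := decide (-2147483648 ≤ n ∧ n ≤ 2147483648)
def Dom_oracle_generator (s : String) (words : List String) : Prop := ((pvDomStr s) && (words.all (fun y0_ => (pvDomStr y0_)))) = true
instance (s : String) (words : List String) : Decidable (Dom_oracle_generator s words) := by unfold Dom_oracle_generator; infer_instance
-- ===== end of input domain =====

-- B replaces A's naive top-down recursion with a bottom-up DP over suffixes (each suffix's segmentation list is built once, not re-explored).
-- A is a Python generator; the ports return the list of all yielded segmentations.

-- ===== PORT A =====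
-- Fuel only makes the recursion total: on Pre_ inputs (no empty word) each
-- recursive call strictly shortens s, so fuel s.length+1 is never exhausted.
def oracleA (words : List String) : Nat → List Char → List (List String)
  | 0, _ => []
  | fuel + 1, s =>
    if s = [] then [[]]
    else
      words.foldl (fun acc word =>
        if PySem.Chars.startswith s word.toList then
          acc ++ (oracleA words fuel (s.drop word.toList.length)).map (fun suffix => word :: suffix)
        else acc) []

def oracle_generator (s : String) (words : List String) : List (List String) :=
  oracleA words (s.toList.length + 1) s.toList

-- ===== PORT B =====
-- bTable words s = [sols(s), sols(s.drop 1), …, sols("")], built back to front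
-- like Source B's dict `sols`; getD mirrors the dict lookup sols[i+len(w)].
def bTable (words : List String) : List Char → List (List (List String))
  | [] => [[[]]]
  | c :: rest =>
    let tbl := bTable words rest
    (words.flatMap (fun w =>
      if PySem.Chars.startswith (c :: rest) w.toList then
        (tbl.getD (w.toList.length - 1) []).map (fun r => w :: r)
      else [])) :: tbl

def oracle_generator_alt (s : String) (words : List String) : List (List String) :=
  (bTable words s.toList).headD []

-- ===== PRECONDITION & SPEC =====
-- Pre_ excludes only inputs where A never returns: with "" ∈ words and s ≠ "" the
-- Python A recurses forever (RecursionError); Source B raises KeyError there too.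
def Pre_oracle_generator (s : String) (words : List String) : Prop :=
  s = "" ∨ ∀ w ∈ words, w ≠ ""
instance (s : String) (words : List String) : Decidable (Pre_oracle_generator s words) := by
  unfold Pre_oracle_generator; infer_instance

def pvWitness_oracle_generator : String × List String := ("ab", ["a", "b", "ab"])

def Spec_oracle_generator (s : String) (words : List String) (out : List (List String)) : Prop := out = oracle_generator_alt s words
instance (s : String) (words : List String) (out : List (List String)) : Decidable (Spec_oracle_generator s words out) := by unfold Spec_oracle_generator; infer_instance

-- ===== CLAIM (what is proved, stated in full; the proofs are below) =====
def Claim_equal_oracle_generator : Prop := ∀ (s : String) (words : List String), Dom_oracle_generator s words → Pre_oracle_generator s words → Spec_oracle_generator s words (oracle_generator s words)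

-- ===== LEMMAS AND PROOFS =====

-- no empty word, as a condition on the char lists
def noEmpty (words : List String) : Prop := ∀ w ∈ words, w.toList ≠ []

theorem noEmpty_of_pre {words : List String} (h : ∀ w ∈ words, w ≠ "") : noEmpty words := by
  intro w hw hnil
  exact h w hw (String.toList_eq_nil_iff.mp hnil)

theorem startswith_len_le {s p : List Char} (h : PySem.Chars.startswith s p = true) :
    p.length ≤ s.length :=
  List.IsPrefix.length_le ((PySem.Chars.startswith_iff s p).1 h)

-- fuel irrelevance: any sufficient fuel computes the same result
theorem oracleA_fuel {words : List String} (hw : noEmpty words) :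
    ∀ f1 f2 s, s.length < f1 → s.length < f2 →
      oracleA words f1 s = oracleA words f2 s := by
  intro f1
  induction f1 with
  | zero => intro f2 s h1 _; omega
  | succ g1 ih =>
    intro f2 s h1 h2
    cases f2 with
    | zero => omega
    | succ g2 =>
      by_cases hs : s = []
      · simp [oracleA, hs]
      · simp only [oracleA, if_neg hs]
        refine PySem.List.foldl_congr_mem _ _ _ _ (fun acc w hwmem => ?_)
        by_cases hp : PySem.Chars.startswith s w.toList = true
        · have hwl : 1 ≤ w.toList.length := by
            have := hw w hwmem
            cases hl : w.toList with
            | nil => exact absurd hl this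
            | cons a l => simp
          have hle := startswith_len_le hp
          have hd : (s.drop w.toList.length).length = s.length - w.toList.length := by
            simp
          rw [if_pos hp, if_pos hp, ih g2 (s.drop w.toList.length) (by omega) (by omega)]
        · rw [if_neg hp, if_neg hp]

-- loop shape of A's inner fold: conditional extend as a flatMap
theorem foldl_if_append_eq_flatMap {α β : Type} (l : List α) (p : α → Bool) (g : α → List β)
    (acc : List β) :
    l.foldl (fun a x => if p x then a ++ g x else a) acc
      = acc ++ l.flatMap (fun x => if p x then g x else []) := by
  induction l generalizing acc with
  | nil => simp
  | cons x l ih => by_cases hp : p x <;> simp [hp, ih]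

-- the table computed by B is the per-suffix list of A's results
theorem bTable_eq {words : List String} (hw : noEmpty words) :
    ∀ s : List Char, bTable words s =
      (List.range (s.length + 1)).map
        (fun j => oracleA words ((s.drop j).length + 1) (s.drop j)) := by
  intro s
  induction s with
  | nil => simp [bTable, List.range_succ, oracleA]
  | cons c rest ih =>
    have hrng : List.range (rest.length + 1 + 1) =
        0 :: (List.range (rest.length + 1)).map Nat.succ := List.range_succ_eq_map
    simp only [bTable, ih, List.length_cons, hrng, List.map_cons, List.map_map]
    congr 1
    · -- head: cur = oracleA (s.length+1) s
      have hne : (c :: rest) ≠ ([] : List Char) := by simp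
      simp only [List.drop_zero, List.length_cons]
      conv_rhs => rw [oracleA]
      rw [if_neg hne, foldl_if_append_eq_flatMap, List.nil_append]
      refine (List.flatMap_congr ?_).symm
      intro w hwmem
      by_cases hp : PySem.Chars.startswith (c :: rest) w.toList = true
      · have hwl : 1 ≤ w.toList.length := by
          have := hw w hwmem
          cases hl : w.toList with
          | nil => exact absurd hl this
          | cons a l => simp
        have hle := startswith_len_le hp
        simp only [List.length_cons] at hle
        rw [if_pos hp, if_pos hp]
        have hidx : w.toList.length - 1 < rest.length + 1 := by omega
        have hget : ((List.range (rest.length + 1)).map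
            (fun j => oracleA words ((rest.drop j).length + 1) (rest.drop j))).getD
              (w.toList.length - 1) []
            = oracleA words ((rest.drop (w.toList.length - 1)).length + 1)
                (rest.drop (w.toList.length - 1)) := by
          rw [List.getD_eq_getElem?_getD, List.getElem?_map, List.getElem?_range hidx]
          rfl
        have hdrop : rest.drop (w.toList.length - 1) = (c :: rest).drop w.toList.length := by
          have : w.toList.length = (w.toList.length - 1) + 1 := by omega
          rw [this]; rfl
        rw [hget, hdrop]
        exact congrArg (List.map fun suffix => w :: suffix)
          (oracleA_fuel hw _ _ _
            (by simp only [List.length_drop, List.length_cons]; omega)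
            (by omega))
      · rw [if_neg hp, if_neg hp]

-- ===== VERDICT (by name: the statement is the Claim_ definition above) =====
theorem oracle_generator_spec : Claim_equal_oracle_generator := by
  intro s words _ hpre
  unfold Spec_oracle_generator oracle_generator oracle_generator_alt
  rcases hpre with hs | hw
  · subst hs; simp [bTable, oracleA]
  · rw [bTable_eq (noEmpty_of_pre hw) s.toList, List.range_succ_eq_map]
    simp
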